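-- pv_equiv track=rewrite | github.com/woo00oo/codingtest_study | 프로그래머스/더 맵게.py | solution
-- ===== SOURCE A (Python) =====
-- import heapq
--
-- def solution(scoville,K):
--     heapq.heapify(scoville)
--     answer = 0
--
--     while True:
--         Min = heapq.heappop(scoville)
--         if Min >= K:
--             return answer
--         if Min < K and len(scoville) == 0:
--             return -1
--         Min2 = heapq.heappop(scoville)
--         heapq.heappush(scoville, Min+(Min2*2))
--         answer += 1
-- ===== SOURCE B (Python) =====
-- def _pop(base, mixed, i, j):
--     # take the smaller front of the two nondecreasing streams
--     if i < len(base) and (j == len(mixed) or base[i] <= mixed[j]):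
--         return base[i], i + 1, j
--     return mixed[j], i, j + 1
--
--
-- def solution(scoville, K):
--     base = sorted(scoville)
--     mixed = []          # produced mixes; always nondecreasing, consumed from the front
--     i = j = 0
--     answer = 0
--     while True:
--         m, i, j = _pop(base, mixed, i, j)   # IndexError when everything is consumed
--         if m >= K:
--             return answer
--         if i == len(base) and j == len(mixed):
--             return -1
--         m2, i, j = _pop(base, mixed, i, j)
--         mixed.append(m + 2 * m2)
--         answer += 1
-- ===== Notes on version B (the rewrite author's own statement) =====
-- stated objective: faster
-- what changed: Replaces the priority queue entirely by a monotone two-stream merge: sort the input once, keep newly produced mixes in a plain FIFO list (they are provably nondecreasing), and take each minimum by comparing the two stream fronts in O(1) instead of O(log n) heap operations.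
import Mathlib
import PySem

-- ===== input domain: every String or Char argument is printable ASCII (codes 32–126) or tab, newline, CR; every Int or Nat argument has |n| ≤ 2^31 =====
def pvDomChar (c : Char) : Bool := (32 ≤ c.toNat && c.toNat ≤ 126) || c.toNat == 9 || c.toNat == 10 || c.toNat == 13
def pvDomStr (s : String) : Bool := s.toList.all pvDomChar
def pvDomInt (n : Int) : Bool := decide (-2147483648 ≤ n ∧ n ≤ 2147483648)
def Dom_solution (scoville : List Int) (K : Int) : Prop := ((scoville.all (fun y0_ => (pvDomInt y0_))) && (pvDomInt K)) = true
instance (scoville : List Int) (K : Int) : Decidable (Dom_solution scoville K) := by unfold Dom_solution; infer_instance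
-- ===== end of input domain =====

-- B drops the heap for a monotone two-stream merge (sorted input + FIFO of produced mixes), measured faster;
-- equivalence is about the RETURN value only: Python A mutates scoville into heap order, B does not.
-- ===== PORT A =====
-- heapq is ported by its contract: heappop yields the minimum element (erase = remove one occurrence),
-- heappush adds an element; the loop recurses on the shrinking heap size.
def solutionLoopA (K : Int) (heap : List Int) (answer : Int) : Int :=
  match hm : heap.min? with
  | none => 0  -- heappop on empty: unreachable under Pre_solution (A raises IndexError)
  | some m =>
    if m ≥ K then answer
    else
      let rest := heap.erase m
      if hr : rest = [] then -1
      else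
        match hm2 : rest.min? with
        | none => 0  -- unreachable: rest ≠ []
        | some m2 => solutionLoopA K ((m + m2 * 2) :: rest.erase m2) (answer + 1)
termination_by heap.length
decreasing_by
  simp only [List.length_cons]
  have h1 : m ∈ heap := (List.min?_eq_some_iff.mp hm).1
  have h2 : m2 ∈ heap.erase m := (List.min?_eq_some_iff.mp hm2).1
  have e1 := List.length_erase_of_mem h1
  have e2 := List.length_erase_of_mem h2
  have hpos : 0 < heap.length := List.length_pos_of_mem h1
  have hpos2 : 0 < (heap.erase m).length := List.length_pos_of_mem h2
  omega

def solution (scoville : List Int) (K : Int) : Int :=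
  solutionLoopA K scoville 0

-- ===== PORT B =====
-- Source B's _pop: take the smaller front of the two streams (base suffix, mixed-FIFO suffix);
-- the Python index pointers i/j are represented by the unconsumed suffixes themselves.
def popMinB : List Int → List Int → Option (Int × List Int × List Int)
  | [], [] => none                       -- mixed[j] on empty: IndexError (unreachable under Pre_solution)
  | b :: bs, [] => some (b, bs, [])
  | [], m :: ms => some (m, [], ms)
  | b :: bs, m :: ms => if b ≤ m then some (b, bs, m :: ms) else some (m, b :: bs, ms)

theorem popMinB_length (s mq s' q' : List Int) (m : Int)
    (h : popMinB s mq = some (m, s', q')) : s'.length + q'.length + 1 = s.length + mq.length := by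
  match s, mq with
  | [], [] => simp [popMinB] at h
  | b :: bs, [] => simp [popMinB] at h; obtain ⟨_, h1, h2⟩ := h; subst h1; subst h2; simp
  | [], c :: ms => simp [popMinB] at h; obtain ⟨_, h1, h2⟩ := h; subst h1; subst h2; simp
  | b :: bs, c :: ms =>
    simp only [popMinB] at h
    split at h <;> (simp at h; obtain ⟨_, h1, h2⟩ := h; subst h1; subst h2; simp) <;> omega

def solutionLoopB (K : Int) (s mq : List Int) (answer : Int) : Int :=
  match h1 : popMinB s mq with
  | none => 0  -- unreachable under Pre_solution (B raises IndexError)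
  | some (m, s1, q1) =>
    if m ≥ K then answer
    else
      match h2 : popMinB s1 q1 with
      | none => -1
      | some (m2, s2, q2) => solutionLoopB K s2 (q2 ++ [m + 2 * m2]) (answer + 1)
termination_by s.length + mq.length
decreasing_by
  have e1 := popMinB_length _ _ _ _ _ h1
  have e2 := popMinB_length _ _ _ _ _ h2
  simp only [List.length_append, List.length_cons, List.length_nil]
  omega

def solution_alt (scoville : List Int) (K : Int) : Int :=
  solutionLoopB K (PySem.List.sorted scoville (fun x => x) false) [] 0

-- ===== PRECONDITION & SPEC =====
-- Pre_ excludes the empty list, on which both A's heappop and B's _pop raise IndexError.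
def Pre_solution (scoville : List Int) (K : Int) : Prop := scoville ≠ []
instance (scoville : List Int) (K : Int) : Decidable (Pre_solution scoville K) := by
  unfold Pre_solution; infer_instance
def pvWitness_solution : List Int × Int := ([1, 2, 3, 9, 10, 12], 7)
def Spec_solution (scoville : List Int) (K : Int) (out : Int) : Prop := out = solution_alt scoville K
instance (scoville : List Int) (K : Int) (out : Int) : Decidable (Spec_solution scoville K out) := by unfold Spec_solution; infer_instance

-- ===== CLAIM (what is proved, stated in full; the proofs are below) =====
def Claim_equal_solution : Prop := ∀ (scoville : List Int) (K : Int), Dom_solution scoville K → Pre_solution scoville K → Spec_solution scoville K (solution scoville K)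

-- ===== LEMMAS AND PROOFS =====

-- the FIFO invariant: every queued mix is bounded by u+2v for any pair u,v drawn from the
-- base suffix together with the part of the queue produced before it
def QInv (s mq : List Int) : Prop :=
  ∀ pre x suf, mq = pre ++ x :: suf →
    ∀ u v : Int, List.Subperm [u, v] (s ++ pre) → x ≤ min u v + 2 * max u v

theorem popMinB_none (s mq : List Int) (h : popMinB s mq = none) : s = [] ∧ mq = [] := by
  match s, mq with
  | [], [] => exact ⟨rfl, rfl⟩
  | b :: bs, [] => simp [popMinB] at h
  | [], c :: ms => simp [popMinB] at h
  | b :: bs, c :: ms => simp only [popMinB] at h; split at h <;> simp at h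

theorem popMinB_cases (s mq s' q' : List Int) (m : Int)
    (h : popMinB s mq = some (m, s', q')) :
    (s = m :: s' ∧ q' = mq) ∨ (s' = s ∧ mq = m :: q') := by
  match s, mq with
  | [], [] => simp [popMinB] at h
  | b :: bs, [] =>
    simp [popMinB] at h; obtain ⟨rfl, rfl, rfl⟩ := h; exact Or.inl ⟨rfl, rfl⟩
  | [], c :: ms =>
    simp [popMinB] at h; obtain ⟨rfl, rfl, rfl⟩ := h; exact Or.inr ⟨rfl, rfl⟩
  | b :: bs, c :: ms =>
    simp only [popMinB] at h
    split at h <;> simp at h <;> obtain ⟨rfl, rfl, rfl⟩ := h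
    · exact Or.inl ⟨rfl, rfl⟩
    · exact Or.inr ⟨rfl, rfl⟩

theorem popMinB_min (s mq s' q' : List Int) (m : Int)
    (hs : s.Pairwise (· ≤ ·)) (hq : mq.Pairwise (· ≤ ·))
    (h : popMinB s mq = some (m, s', q')) : ∀ x ∈ s ++ mq, m ≤ x := by
  match s, mq with
  | [], [] => simp [popMinB] at h
  | b :: bs, [] =>
    simp [popMinB] at h; obtain ⟨rfl, rfl, rfl⟩ := h
    intro x hx
    rcases (by simpa using hx : x = b ∨ x ∈ bs) with h' | h'
    · omega
    · exact (List.pairwise_cons.mp hs).1 x h'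
  | [], c :: ms =>
    simp [popMinB] at h; obtain ⟨rfl, rfl, rfl⟩ := h
    intro x hx
    rcases (by simpa using hx : x = c ∨ x ∈ ms) with h' | h'
    · omega
    · exact (List.pairwise_cons.mp hq).1 x h'
  | b :: bs, c :: ms =>
    simp only [popMinB] at h
    split at h <;> (rename_i hbc; simp at h; obtain ⟨rfl, rfl, rfl⟩ := h) <;> intro x hx <;>
      rcases (by simpa using hx : x = b ∨ x ∈ bs ∨ x = c ∨ x ∈ ms) with h' | h' | h' | h'
    · omega
    · exact (List.pairwise_cons.mp hs).1 x h'
    · omega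
    · exact le_trans hbc ((List.pairwise_cons.mp hq).1 x h')
    · exact le_trans (by omega) (le_of_eq h'.symm)
    · exact le_trans (by omega) ((List.pairwise_cons.mp hs).1 x h')
    · omega
    · exact (List.pairwise_cons.mp hq).1 x h'

theorem popMinB_perm (s mq s' q' : List Int) (m : Int)
    (h : popMinB s mq = some (m, s', q')) : (m :: (s' ++ q')).Perm (s ++ mq) := by
  rcases popMinB_cases s mq s' q' m h with ⟨e1, e2⟩ | ⟨e1, e2⟩
  · rw [e1, e2]; simp
  · rw [e1, e2]; exact (List.perm_middle).symm

-- decomposing a decomposition of l ++ [n]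
theorem append_singleton_decomp (l pre suf : List Int) (x n : Int)
    (h : l ++ [n] = pre ++ x :: suf) :
    (pre = l ∧ x = n ∧ suf = []) ∨ ∃ suf', suf = suf' ++ [n] ∧ l = pre ++ x :: suf' := by
  rcases suf.eq_nil_or_concat with hsuf | ⟨suf', b, hsuf⟩
  · subst hsuf
    have h2 : l ++ [n] = pre ++ [x] := by simpa using h
    have h3 := List.append_inj' h2 rfl
    refine Or.inl ⟨h3.1.symm, ?_, rfl⟩
    have := h3.2; simp at this; omega
  · subst hsuf
    have h' : l ++ [n] = (pre ++ x :: suf') ++ [b] := by simpa using h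
    have h3 := List.append_inj' h' rfl
    have hb : b = n := by have := h3.2; simp at this; omega
    subst hb
    exact Or.inr ⟨suf', by simp, h3.1⟩

theorem loopB_none (K : Int) (s mq : List Int) (ans : Int)
    (h : popMinB s mq = none) : solutionLoopB K s mq ans = 0 := by
  rw [solutionLoopB.eq_def]
  split
  · rfl
  · rename_i m s1 q1 h'; rw [h] at h'; simp at h'

theorem loopB_step (K : Int) (s mq s1 q1 : List Int) (m ans : Int)
    (h1 : popMinB s mq = some (m, s1, q1)) :
    solutionLoopB K s mq ans =
      if m ≥ K then ans
      else
        match popMinB s1 q1 with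
        | none => -1
        | some (m2, s2, q2) => solutionLoopB K s2 (q2 ++ [m + 2 * m2]) (ans + 1) := by
  rw [solutionLoopB.eq_def]
  split
  · rename_i h'; rw [h1] at h'; simp at h'
  · rename_i m' s1' q1' h'
    rw [h1] at h'
    injection h' with h'
    injection h' with e0 h''
    injection h'' with e1 e2
    subst e0; subst e1; subst e2
    by_cases hK : m ≥ K
    · simp [hK]
    · rw [if_neg hK, if_neg hK]
      cases hp2 : popMinB s1 q1 with
      | none => rfl
      | some p2 => obtain ⟨m2, s2, q2⟩ := p2; rfl

-- core agreement: A's heap is a permutation of B's (base suffix, mix FIFO) state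
theorem loop_agree (K : Int) : ∀ n (heap s mq : List Int) (ans : Int),
    heap.length ≤ n → (s ++ mq).Perm heap →
    s.Pairwise (· ≤ ·) → mq.Pairwise (· ≤ ·) → QInv s mq →
    solutionLoopA K heap ans = solutionLoopB K s mq ans := by
  intro n
  induction n with
  | zero =>
    intro heap s mq ans hn hp _ _ _
    have hh : heap = [] := List.eq_nil_of_length_eq_zero (by omega)
    subst hh
    have h0 : s ++ mq = [] := List.eq_nil_of_length_eq_zero (by simpa using hp.length_eq)
    have hs : s = [] := by cases s <;> simp_all
    have hq : mq = [] := by simp_all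
    subst hs; subst hq
    rw [loopB_none K [] [] ans rfl]
    simp [solutionLoopA]
  | succ n ih =>
    intro heap s mq ans hn hp hs hq hinv
    match h1 : popMinB s mq with
    | none =>
      obtain ⟨e1, e2⟩ := popMinB_none s mq h1
      subst e1; subst e2
      have hh : heap = [] := List.eq_nil_of_length_eq_zero (by simpa using hp.length_eq.symm)
      subst hh
      rw [loopB_none K [] [] ans h1]
      simp [solutionLoopA]
    | some (m, s1, q1) =>
      rw [solutionLoopA.eq_def, loopB_step K s mq s1 q1 m ans h1]
      have hperm1 : (m :: (s1 ++ q1)).Perm (s ++ mq) := popMinB_perm s mq s1 q1 m h1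
      have hm0 : m ∈ s ++ mq := hperm1.mem_iff.mp (show m ∈ m :: (s1 ++ q1) by simp)
      have hmem : m ∈ heap := hp.mem_iff.mp hm0
      have hminall : ∀ x ∈ s ++ mq, m ≤ x := popMinB_min s mq s1 q1 m hs hq h1
      have hmin : heap.min? = some m := by
        rw [List.min?_eq_some_iff]
        exact ⟨hmem, fun b hb => hminall b (hp.mem_iff.mpr hb)⟩
      split
      · rename_i h0; rw [hmin] at h0; cases h0
      · rename_i m' hm'
        rw [hmin] at hm'; injection hm' with hm'; subst hm'
        by_cases hK : m ≥ K
        · simp [hK]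
        · rw [if_neg hK, if_neg hK]
          simp only []
          have hrestperm : (s1 ++ q1).Perm (heap.erase m) := by
            have h2 : ((m :: (s1 ++ q1)).erase m).Perm (heap.erase m) :=
              (hperm1.trans hp).erase m
            simpa using h2
          -- sortedness of the two new suffixes
          have hs1 : s1.Pairwise (· ≤ ·) := by
            rcases popMinB_cases s mq s1 q1 m h1 with ⟨e1, _⟩ | ⟨e1, _⟩
            · rw [e1] at hs; exact (List.pairwise_cons.mp hs).2
            · rw [e1]; exact hs
          have hq1 : q1.Pairwise (· ≤ ·) := by
            rcases popMinB_cases s mq s1 q1 m h1 with ⟨_, e2⟩ | ⟨_, e2⟩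
            · rw [e2]; exact hq
            · rw [e2] at hq; exact (List.pairwise_cons.mp hq).2
          match h2 : popMinB s1 q1 with
          | none =>
            obtain ⟨e1, e2⟩ := popMinB_none s1 q1 h2
            subst e1; subst e2
            have : heap.erase m = [] :=
              List.eq_nil_of_length_eq_zero (by simpa using hrestperm.length_eq.symm)
            simp [this]
          | some (m2, s2, q2) =>
            show _ = solutionLoopB K s2 (q2 ++ [m + 2 * m2]) (ans + 1)
            have hrne : heap.erase m ≠ [] := by
              intro h0
              have := hrestperm.length_eq
              rcases popMinB_cases s1 q1 s2 q2 m2 h2 with ⟨e1, _⟩ | ⟨_, e2⟩ <;> simp_all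
            rw [dif_neg hrne]
            have hperm2 : (m2 :: (s2 ++ q2)).Perm (s1 ++ q1) := popMinB_perm s1 q1 s2 q2 m2 h2
            have hmin2all : ∀ x ∈ s1 ++ q1, m2 ≤ x := popMinB_min s1 q1 s2 q2 m2 hs1 hq1 h2
            have hm20 : m2 ∈ s1 ++ q1 := hperm2.mem_iff.mp (show m2 ∈ m2 :: (s2 ++ q2) by simp)
            have hm2mem : m2 ∈ heap.erase m := hrestperm.mem_iff.mp hm20
            have hmin2 : (heap.erase m).min? = some m2 := by
              rw [List.min?_eq_some_iff]
              exact ⟨hm2mem, fun b hb => hmin2all b (hrestperm.mem_iff.mpr hb)⟩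
            split
            · rename_i h0; rw [hmin2] at h0; cases h0
            · rename_i m2' hm2'
              rw [hmin2] at hm2'; injection hm2' with hm2'; subst hm2'
              have hmm2 : m ≤ m2 := hminall m2 (hperm1.mem_iff.mp (List.mem_cons_of_mem m hm20))
              -- the queue fronts popped in the two pops form a prefix `pref` of mq (mq = pref ++ q2),
              -- and the pair (m, m2) is a sub-multiset of s ++ pref ++ anything
              have hpair : ∃ pref : List Int, mq = pref ++ q2 ∧
                  ∀ mid : List Int, List.Subperm [m, m2] (s ++ (pref ++ mid)) := by
                rcases popMinB_cases s mq s1 q1 m h1 with ⟨e1, e2⟩ | ⟨e1, e2⟩ <;>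
                  rcases popMinB_cases s1 q1 s2 q2 m2 h2 with ⟨f1, f2⟩ | ⟨f1, f2⟩
                · -- both from base: s = m :: m2 :: s2, mq = q2
                  refine ⟨[], by simp [f2, e2], fun mid => List.Sublist.subperm ?_⟩
                  rw [e1, f1]
                  simp only [List.nil_append, List.cons_append]
                  exact (List.cons_sublist_cons).mpr ((List.cons_sublist_cons).mpr (by simp))
                · -- base then queue: s = m :: s1, mq = q1 = m2 :: q2
                  refine ⟨[m2], by simp [← e2, f2], fun mid => List.Sublist.subperm ?_⟩
                  rw [e1]
                  refine (List.cons_sublist_cons).mpr ?_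
                  exact List.Sublist.trans (by simp) (List.sublist_append_right s1 (m2 :: mid))
                · -- queue then base: mq = m :: q1, s = m2 :: s2, q2 = q1
                  refine ⟨[m], by simp [e2, f2], fun mid => ?_⟩
                  refine List.Subperm.trans ?_ (List.Sublist.subperm (l₁ := [m2, m]) ?_)
                  · exact (List.Perm.swap m2 m []).subperm
                  · rw [← e1, f1]
                    refine (List.cons_sublist_cons).mpr ?_
                    exact List.Sublist.trans (by simp) (List.sublist_append_right s2 (m :: mid))
                · -- both from queue: mq = m :: m2 :: q2
                  refine ⟨[m, m2], by simp [e2, f2], fun mid => List.Sublist.subperm ?_⟩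
                  exact List.Sublist.trans
                    ((List.cons_sublist_cons).mpr ((List.cons_sublist_cons).mpr (by simp)))
                    (List.sublist_append_right s (m :: m2 :: mid))
              obtain ⟨pref, hmqpref, hpairsub⟩ := hpair
              -- every queued mix is ≤ the new mix n = m + 2*m2
              have hle_new : ∀ x ∈ q2, x ≤ m + 2 * m2 := by
                intro x hx
                obtain ⟨pre, suf, hdec⟩ := List.append_of_mem hx
                have hx2 : mq = (pref ++ pre) ++ x :: suf := by
                  rw [hmqpref, hdec]; simp
                have := hinv _ x _ hx2 m m2 (by simpa using hpairsub pre)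
                have hmin_eq : min m m2 = m := min_eq_left hmm2
                have hmax_eq : max m m2 = m2 := max_eq_right hmm2
                omega
              -- the new queue is still sorted
              have hq2 : q2.Pairwise (· ≤ ·) := by
                rcases popMinB_cases s1 q1 s2 q2 m2 h2 with ⟨_, f2⟩ | ⟨_, f2⟩
                · rw [f2]; exact hq1
                · rw [f2] at hq1; exact (List.pairwise_cons.mp hq1).2
              have hs2 : s2.Pairwise (· ≤ ·) := by
                rcases popMinB_cases s1 q1 s2 q2 m2 h2 with ⟨f1, _⟩ | ⟨f1, _⟩
                · rw [f1] at hs1; exact (List.pairwise_cons.mp hs1).2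
                · rw [f1]; exact hs1
              have hqnew : (q2 ++ [m + 2 * m2]).Pairwise (· ≤ ·) := by
                rw [List.pairwise_append]
                refine ⟨hq2, by simp, fun x hx y hy => ?_⟩
                have h5 := hle_new x hx
                have h6 : y = m + 2 * m2 := by simpa using hy
                omega
              -- QInv is preserved
              have hinv' : QInv s2 (q2 ++ [m + 2 * m2]) := by
                intro pre x suf hdec u v hsub
                rcases append_singleton_decomp q2 pre suf x (m + 2 * m2) hdec with
                  ⟨hp1, hp2, _⟩ | ⟨suf', _, hq2dec⟩
                · -- x is the new mix: any pair from s2 ++ q2 is ≥ m2 componentwise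
                  subst hp2
                  rw [hp1] at hsub
                  have humem : u ∈ s1 ++ q1 := by
                    have hu : u ∈ s2 ++ q2 := hsub.subset (by simp)
                    exact hperm2.mem_iff.mp (List.mem_cons_of_mem m2 hu)
                  have hvmem : v ∈ s1 ++ q1 := by
                    have hv : v ∈ s2 ++ q2 := hsub.subset (by simp)
                    exact hperm2.mem_iff.mp (List.mem_cons_of_mem m2 hv)
                  have h1u := hmin2all u humem
                  have h1v := hmin2all v hvmem
                  rcases le_total u v with huv | huv
                  · rw [min_eq_left huv, max_eq_right huv]; omega
                  · rw [min_eq_right huv, max_eq_left huv]; omega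
                · -- x is an old queued mix: shrink the pair back into the old state
                  have hx2 : mq = (pref ++ pre) ++ x :: suf' := by
                    rw [hmqpref, hq2dec]; simp
                  refine hinv _ x _ hx2 u v (hsub.trans (List.Sublist.subperm ?_))
                  have hssub : List.Sublist s2 s := by
                    have h1sub : List.Sublist s1 s := by
                      rcases popMinB_cases s mq s1 q1 m h1 with ⟨e1, _⟩ | ⟨e1, _⟩
                      · rw [e1]; exact List.sublist_cons_self m s1
                      · rw [e1]
                    have h2sub : List.Sublist s2 s1 := by
                      rcases popMinB_cases s1 q1 s2 q2 m2 h2 with ⟨f1, _⟩ | ⟨f1, _⟩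
                      · rw [f1]; exact List.sublist_cons_self m2 s2
                      · rw [f1]
                    exact h2sub.trans h1sub
                  exact List.Sublist.append hssub (List.sublist_append_right pref pre)
              have hpermnew : (s2 ++ (q2 ++ [m + 2 * m2])).Perm ((m + m2 * 2) :: (heap.erase m).erase m2) := by
                have hmul : m + m2 * 2 = m + 2 * m2 := by ring
                rw [hmul]
                have he : ((heap.erase m).erase m2).Perm (s2 ++ q2) := by
                  have h3 : ((m2 :: (s2 ++ q2)).erase m2).Perm ((s1 ++ q1).erase m2) :=
                    hperm2.erase m2
                  have h4 : ((s1 ++ q1).erase m2).Perm ((heap.erase m).erase m2) :=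
                    hrestperm.erase m2
                  exact (h3.trans h4).symm.trans (by simp)
                have hstep : (s2 ++ (q2 ++ [m + 2 * m2])).Perm ((m + 2 * m2) :: (s2 ++ q2)) := by
                  have hmid := List.perm_middle (a := m + 2 * m2) (l₁ := s2 ++ q2) (l₂ := ([] : List Int))
                  simpa using hmid
                exact hstep.trans (he.symm.cons _)
              -- length bound and recursive call
              have hlen : ((m + m2 * 2) :: (heap.erase m).erase m2).length ≤ n := by
                have e1 := List.length_erase_of_mem hmem
                have e2 := List.length_erase_of_mem hm2mem
                have hpos : 0 < heap.length := List.length_pos_of_mem hmem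
                have hpos2 : 0 < (heap.erase m).length := List.length_pos_of_mem hm2mem
                simp only [List.length_cons]
                omega
              exact ih _ s2 (q2 ++ [m + 2 * m2]) (ans + 1) hlen hpermnew hs2 hqnew hinv'

-- ===== VERDICT (by name: the statement is the Claim_ definition above) =====
theorem solution_spec : Claim_equal_solution := by
  intro scoville K _ _
  unfold Spec_solution solution solution_alt
  refine loop_agree K scoville.length scoville _ [] 0 (by simp) ?_ ?_ (by simp) ?_
  · simpa using PySem.List.sorted_perm scoville (fun x => x) false
  · simpa using PySem.List.sorted_pairwise scoville (fun x => x)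
  · intro pre x suf h; simp at h
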